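-- pv_equiv track=rewrite | github.com/pypi-data/pypi-mirror-98 | packages/subc/subc-0.5.0-py3-none-any.whl/subc.py | _unique_prefixes
-- ===== SOURCE A (Python) =====
-- import typing as t
--
-- def _first_different(s1: str, s2: str) -> int:
--     """
--     Return index of the first different character in s1 or s2. If the strings
--     are the same, raises a ValueError.
--     """
--     for i, (c1, c2) in enumerate(zip(s1, s2)):
--         if c1 != c2:
--             return i
--     if len(s1) == len(s2):
--         raise ValueError(f"Duplicate string {s1!r} is not allowed")
--     return i + 1
--
-- def _unique_prefixes(strings: t.Iterable[str]) -> t.Dict[str, t.List[str]]: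
--     """
--     Helper to find a list of unique prefixes for each string in strings.
--
--     Return a dict mapping each string to a list of prefixes which are unique
--     among all other strings within the list. Here is an example:
--
--         >>> _unique_prefixes(["commit", "count", "apply", "app", "shape"])
--         {'app': [],
--          'apply': ['appl'],
--          'commit': ['com', 'comm', 'commi'],
--          'count': ['cou', 'coun'],
--          'launch': ['la', 'lau', 'laun', 'launc'],
--          'list': ['li', 'lis'],
--          'shape': ['s', 'sh', 'sha', 'shap']}
--     """
--     strings = sorted(strings)
--     diffs = [0] * len(strings)
--     for i, (s1, s2) in enumerate(zip(strings, strings[1:])):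
--         common = _first_different(s1, s2)
--         diffs[i] = max(diffs[i], common)
--         diffs[i + 1] = max(diffs[i + 1], common)
--     return {
--         s: [s[:i] for i in range(x + 1, len(s))]
--         for (s, x) in zip(strings, diffs)
--     }
-- ===== SOURCE B (Python) =====
-- import typing as t
--
-- def _unique_prefixes(strings: t.Iterable[str]) -> t.Dict[str, t.List[str]]:
--     """
--     For each string, list its prefixes that are unique among all the strings:
--     x(s) is the longest common prefix length between s and any OTHER string,
--     so the unique prefixes of s are s[:i] for x(s) < i < len(s).
--     Computed directly pair-by-pair instead of via sorted-adjacent diffs.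
--     """
--     strings = sorted(strings)
--     if len(set(strings)) != len(strings):
--         raise ValueError("Duplicate string is not allowed")
--
--     def lcp(a: str, b: str) -> int:
--         n = 0
--         while n < len(a) and n < len(b) and a[n] == b[n]:
--             n += 1
--         return n
--
--     result = {}
--     for i, s in enumerate(strings):
--         x = max((lcp(s, t_) for j, t_ in enumerate(strings) if j != i), default=0)
--         result[s] = [s[:k] for k in range(x + 1, len(s))]
--     return result
-- ===== Notes on version B (the rewrite author's own statement) =====
-- stated objective: alternative
-- what changed: B replaces A's sorted-adjacent-pairs diff array (first-different of each neighbour pair maxed into two cells) by a direct per-string computation: x(s) = max longest-common-prefix of s against every other string, computed pair-by-pair; duplicates are checked up front instead of surfacing inside the pair scan.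
import Mathlib
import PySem

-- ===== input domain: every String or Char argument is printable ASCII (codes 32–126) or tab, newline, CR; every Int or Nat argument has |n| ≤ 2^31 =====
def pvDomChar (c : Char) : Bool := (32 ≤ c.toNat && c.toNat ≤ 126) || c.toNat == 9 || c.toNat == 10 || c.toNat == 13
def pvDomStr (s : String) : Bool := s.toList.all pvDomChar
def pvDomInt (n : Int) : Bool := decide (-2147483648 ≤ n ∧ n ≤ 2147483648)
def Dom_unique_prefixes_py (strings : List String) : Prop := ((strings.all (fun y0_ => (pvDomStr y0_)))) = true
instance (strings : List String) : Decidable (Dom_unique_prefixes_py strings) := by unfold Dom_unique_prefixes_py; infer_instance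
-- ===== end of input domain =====

-- B replaces A's sorted-adjacent-pairs diff array by a per-string max of longest common
-- prefixes against all other strings (alternative decomposition, same results on Pre_).

-- ===== PORT A =====
-- _first_different: 'some i' = the returned index; 'none' = the function raises
-- (ValueError on equal strings; UnboundLocalError when the zip is empty, i.e. the
-- shorter string is empty, and the lengths differ).
def pvFirstDiffAux : List (Char × Char) → Int → Option Int
  | [], _ => none
  | (c1, c2) :: rest, i => if c1 ≠ c2 then some i else pvFirstDiffAux rest (i + 1)

def first_different (s1 s2 : String) : Option Int :=
  match pvFirstDiffAux (s1.toList.zip s2.toList) 0 with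
  | some i => some i
  | none =>
      if s1.toList.length = s2.toList.length then none      -- raise ValueError
      else if (s1.toList.zip s2.toList).length = 0 then none -- 'i' unbound: UnboundLocalError
      -- the loop ended with i = len(zip) - 1, so 'i + 1' is the zip length:
      else some ((s1.toList.zip s2.toList).length : Int)

-- the 'for i, (s1, s2) in enumerate(zip(strings, strings[1:]))' loop updating diffs
def pvPairsLoop : List (String × String) → Nat → List Int → List Int
  | [], _, diffs => diffs
  | (s1, s2) :: rest, i, diffs =>
      let common := (first_different s1 s2).getD 0   -- getD: 'none' is a raise, outside Pre_
      let diffs1 := diffs.set i (max (diffs.getD i 0) common)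
      let diffs2 := diffs1.set (i + 1) (max (diffs1.getD (i + 1) 0) common)
      pvPairsLoop rest (i + 1) diffs2

def unique_prefixes_py (strings : List String) : List (String × List String) :=
  let ss := PySem.List.sorted strings (fun s => s) false
  let diffs := pvPairsLoop (ss.zip (PySem.List.slice ss (some 1) none)) 0
                 (List.replicate ss.length 0)
  (ss.zip diffs).map (fun p =>
    (p.1, (PySem.List.pyRange (p.2 + 1) (PySem.Str.len p.1) 1).map
            (fun i => PySem.Str.slice p.1 none (some i))))

-- ===== PORT B =====
def pvLcp : List Char → List Char → Int
  | a :: as, b :: bs => if a = b then 1 + pvLcp as bs else 0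
  | _, _ => 0

-- max((lcp(s, t) for j, t in enumerate(strings) if j != i), default=0):
-- all values are ≥ 0, so Python's max-with-default is the running max from 0.
def pvMaxOther (ss : List String) (i : Int) (s : String) : Int :=
  (PySem.List.enumerate ss).foldl
    (fun acc p => if p.1 ≠ i then max acc (pvLcp s.toList p.2.toList) else acc) 0

def unique_prefixes_py_alt (strings : List String) : List (String × List String) :=
  let ss := PySem.List.sorted strings (fun s => s) false
  if (PySem.Set.ofList ss).length ≠ ss.length then []    -- B raises ValueError on duplicates
  else
    (PySem.List.enumerate ss).map (fun p =>
      (p.2, (PySem.List.pyRange (pvMaxOther ss p.1 p.2 + 1) (PySem.Str.len p.2) 1).map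
              (fun k => PySem.Str.slice p.2 none (some k))))

-- ===== PRECONDITION & SPEC =====
-- Pre_ excludes exactly the inputs on which A raises: duplicate strings (ValueError from
-- _first_different) and the empty string together with another string (UnboundLocalError:
-- the zip loop in _first_different never runs).
def Pre_unique_prefixes_py (strings : List String) : Prop :=
  strings.Nodup ∧ ("" ∈ strings → strings.length = 1)
instance (strings : List String) : Decidable (Pre_unique_prefixes_py strings) := by
  unfold Pre_unique_prefixes_py; infer_instance

def pvWitness_unique_prefixes_py : List String := ["commit", "count", "apply", "app", "shape"]

def Spec_unique_prefixes_py (strings : List String) (out : List (String × List String)) : Prop := out = unique_prefixes_py_alt strings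
instance (strings : List String) (out : List (String × List String)) : Decidable (Spec_unique_prefixes_py strings out) := by unfold Spec_unique_prefixes_py; infer_instance

-- ===== CLAIM (what is proved, stated in full; the proofs are below) =====
def Claim_equal_unique_prefixes_py : Prop := ∀ (strings : List String), Dom_unique_prefixes_py strings → Pre_unique_prefixes_py strings → Spec_unique_prefixes_py strings (unique_prefixes_py strings)


-- ===== LEMMAS AND PROOFS =====

theorem pvLcp_nil_left : ∀ c : List Char, pvLcp [] c = 0
  | [] => rfl
  | _ :: _ => rfl

theorem pvLcp_cons_cons (a b : Char) (as bs : List Char) :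
    pvLcp (a :: as) (b :: bs) = if a = b then 1 + pvLcp as bs else 0 := rfl

theorem pvLcp_nonneg : ∀ a b : List Char, 0 ≤ pvLcp a b
  | [], _ => by simp [pvLcp_nil_left]
  | _ :: _, [] => by simp [pvLcp]
  | a :: as, b :: bs => by
      by_cases h : a = b
      · have := pvLcp_nonneg as bs
        simp only [pvLcp, if_pos h]; omega
      · simp [pvLcp, h]

theorem pvLcp_comm : ∀ a b : List Char, pvLcp a b = pvLcp b a
  | [], [] => rfl
  | [], _ :: _ => rfl
  | _ :: _, [] => rfl
  | a :: as, b :: bs => by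
      by_cases h : a = b
      · simp [pvLcp, h, pvLcp_comm as bs]
      · simp [pvLcp, h, Ne.symm h]

theorem pvFirstDiffAux_some : ∀ (a b : List Char) (k i : Int),
    pvFirstDiffAux (a.zip b) k = some i → i = k + pvLcp a b
  | [], _, _, _ => by intro h; simp [pvFirstDiffAux] at h
  | _ :: _, [], _, _ => by intro h; simp [pvFirstDiffAux] at h
  | a :: as, b :: bs, k, i => by
      intro h
      by_cases hab : a = b
      · simp only [List.zip_cons_cons, pvFirstDiffAux, ne_eq, hab, not_true_eq_false,
          if_false] at h
        have := pvFirstDiffAux_some as bs (k + 1) i h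
        simp only [pvLcp, if_pos hab]; omega
      · simp only [List.zip_cons_cons, pvFirstDiffAux, ne_eq, hab, not_false_eq_true,
          if_true, Option.some_inj] at h
        simp [pvLcp, hab, ← h]

theorem pvFirstDiffAux_none : ∀ (a b : List Char) (k : Int),
    pvFirstDiffAux (a.zip b) k = none → a <+: b ∨ b <+: a
  | [], b, _ => by intro _; left; exact List.nil_prefix
  | _ :: _, [], _ => by intro _; right; exact List.nil_prefix
  | a :: as, b :: bs, k => by
      intro h
      by_cases hab : a = b
      · simp only [List.zip_cons_cons, pvFirstDiffAux, ne_eq, hab, not_true_eq_false,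
          if_false] at h
        rcases pvFirstDiffAux_none as bs (k + 1) h with h' | h'
        · left; subst hab; exact List.cons_prefix_cons.mpr ⟨rfl, h'⟩
        · right; subst hab; exact List.cons_prefix_cons.mpr ⟨rfl, h'⟩
      · simp [pvFirstDiffAux, hab] at h

theorem pvLcp_of_prefix : ∀ (a b : List Char), a <+: b → pvLcp a b = (a.length : Int)
  | [], b, _ => by simp [pvLcp_nil_left]
  | a :: as, b, h => by
      rcases h with ⟨t, rfl⟩
      simp only [List.cons_append, pvLcp_cons_cons]
      rw [pvLcp_of_prefix as (as ++ t) ⟨t, rfl⟩]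
      simp only [List.length_cons]
      push_cast
      omega

theorem first_different_eq (s1 s2 : String) (hne : s1.toList ≠ s2.toList)
    (h1 : s1.toList ≠ []) (h2 : s2.toList ≠ []) :
    first_different s1 s2 = some (pvLcp s1.toList s2.toList) := by
  unfold first_different
  cases hfd : pvFirstDiffAux (s1.toList.zip s2.toList) 0 with
  | some i =>
      have := pvFirstDiffAux_some _ _ _ _ hfd
      simp [this]
  | none =>
      have hzl : (s1.toList.zip s2.toList).length = min s1.toList.length s2.toList.length :=
        List.length_zip
      have h1' : s1.toList.length ≠ 0 := fun hc => h1 (List.length_eq_zero_iff.mp hc)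
      have h2' : s2.toList.length ≠ 0 := fun hc => h2 (List.length_eq_zero_iff.mp hc)
      rcases pvFirstDiffAux_none _ _ _ hfd with hp | hp
      · have hlt : s1.toList.length < s2.toList.length := by
          rcases Nat.lt_or_ge s1.toList.length s2.toList.length with h | h
          · exact h
          · exact absurd (hp.eq_of_length (le_antisymm hp.length_le h)) hne
        rw [if_neg (by omega), if_neg (by omega)]
        have hmin : (s1.toList.zip s2.toList).length = s1.toList.length := by omega
        rw [hmin, pvLcp_of_prefix _ _ hp]
      · have hlt : s2.toList.length < s1.toList.length := by
          rcases Nat.lt_or_ge s2.toList.length s1.toList.length with h | h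
          · exact h
          · exact absurd (hp.eq_of_length (le_antisymm hp.length_le h)).symm hne
        rw [if_neg (by omega), if_neg (by omega)]
        have hmin : (s1.toList.zip s2.toList).length = s2.toList.length := by omega
        rw [hmin, pvLcp_comm, pvLcp_of_prefix _ _ hp]

theorem first_different_getD_nonneg (s1 s2 : String) : 0 ≤ (first_different s1 s2).getD 0 := by
  unfold first_different
  cases hfd : pvFirstDiffAux (s1.toList.zip s2.toList) 0 with
  | some i =>
      have h := pvFirstDiffAux_some _ _ _ _ hfd
      have := pvLcp_nonneg s1.toList s2.toList
      simp only [Option.getD_some]; omega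
  | none => split_ifs <;> simp

theorem pvLcp_le_right {a b c : List Char} (h1 : List.Lex (· < ·) a b)
    (h2 : List.Lex (· < ·) b c) : pvLcp a c ≤ pvLcp b c := by
  induction h1 generalizing c with
  | nil =>
      rw [pvLcp_nil_left]
      exact pvLcp_nonneg _ _
  | @rel x l₁ y l₂ hxy =>
      cases h2 with
      | @rel _ _ z l₃ hr =>
          have hxz : x ≠ z := ne_of_lt (lt_trans hxy hr)
          rw [pvLcp_cons_cons, if_neg hxz]
          exact pvLcp_nonneg _ _
      | @cons _ _ l₃ h2' =>
          have hxy' : x ≠ y := ne_of_lt hxy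
          rw [pvLcp_cons_cons, if_neg hxy']
          exact pvLcp_nonneg _ _
  | @cons x l₁ l₂ h ih =>
      cases h2 with
      | @rel _ _ z l₃ hr =>
          have hxz : x ≠ z := ne_of_lt hr
          rw [pvLcp_cons_cons, if_neg hxz]
          exact pvLcp_nonneg _ _
      | @cons _ _ l₃ h2' =>
          rw [pvLcp_cons_cons, if_pos rfl, pvLcp_cons_cons, if_pos rfl]
          have := ih h2'
          omega

theorem pvLcp_le_left {a b c : List Char} (h1 : List.Lex (· < ·) a b)
    (h2 : List.Lex (· < ·) b c) : pvLcp a c ≤ pvLcp a b := by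
  induction h1 generalizing c with
  | nil =>
      rw [pvLcp_nil_left, pvLcp_nil_left]
  | @rel x l₁ y l₂ hxy =>
      have hxy' : x ≠ y := ne_of_lt hxy
      cases h2 with
      | @rel _ _ z l₃ hr =>
          have hxz : x ≠ z := ne_of_lt (lt_trans hxy hr)
          rw [pvLcp_cons_cons, if_neg hxz, pvLcp_cons_cons, if_neg hxy']
      | @cons _ _ l₃ h2' =>
          rw [pvLcp_cons_cons, if_neg hxy', pvLcp_cons_cons, if_neg hxy']
  | @cons x l₁ l₂ h ih =>
      cases h2 with
      | @rel _ _ z l₃ hr =>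
          have hxz : x ≠ z := ne_of_lt hr
          rw [pvLcp_cons_cons, if_neg hxz, pvLcp_cons_cons, if_pos rfl]
          have := pvLcp_nonneg l₁ l₂
          omega
      | @cons _ _ l₃ h2' =>
          rw [pvLcp_cons_cons, if_pos rfl, pvLcp_cons_cons, if_pos rfl]
          have := ih h2'
          omega

-- the per-cell effect of the diffs loop
def pvApply : List (String × String) → Nat → Nat → Int → Int
  | [], _, _, v => v
  | p :: rest, i, j, v =>
      pvApply rest (i + 1) j
        (if j = i ∨ j = i + 1 then max v ((first_different p.1 p.2).getD 0) else v)

-- the common value of the adjacent pair at absolute position m (0 outside)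
def pvCAt (ps : List (String × String)) (i m : Nat) : Int :=
  if i ≤ m ∧ m - i < ps.length then
    (first_different (ps.getD (m - i) ("", "")).1 (ps.getD (m - i) ("", "")).2).getD 0
  else 0

theorem pvCAt_nonneg (ps : List (String × String)) (i m : Nat) : 0 ≤ pvCAt ps i m := by
  unfold pvCAt; split_ifs
  · exact first_different_getD_nonneg _ _
  · exact le_refl _

theorem pvCAt_cons (p : String × String) (rest : List (String × String)) (i m : Nat) :
    pvCAt (p :: rest) i m =
      if m = i then (first_different p.1 p.2).getD 0 else pvCAt rest (i + 1) m := by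
  unfold pvCAt
  by_cases hmi : m = i
  · subst hmi; simp
  · by_cases hle : i + 1 ≤ m
    · have h1 : m - i = (m - (i + 1)) + 1 := by omega
      rw [if_neg hmi]
      by_cases h2 : m - (i + 1) < rest.length
      · rw [if_pos ⟨by omega, by simp only [List.length_cons]; omega⟩, if_pos ⟨hle, h2⟩, h1]
        simp
      · rw [if_neg (by simp only [List.length_cons]; omega), if_neg (by omega)]
    · rw [if_neg hmi, if_neg (by omega), if_neg (by omega)]

theorem pvApply_eval : ∀ (ps : List (String × String)) (i j : Nat) (v : Int), 0 ≤ v →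
    pvApply ps i j v =
      max (max v (if 1 ≤ j then pvCAt ps i (j - 1) else 0)) (pvCAt ps i j)
  | [], i, j, v, hv => by
      simp only [pvApply, pvCAt, List.length_nil]
      have h0 : ∀ m : Nat, ¬ (i ≤ m ∧ m - i < 0) := by omega
      rw [if_neg (h0 j)]
      by_cases hj : 1 ≤ j
      · rw [if_pos hj, if_neg (h0 (j - 1))]
        simp only [Int.max_def]; split_ifs <;> omega
      · rw [if_neg hj]
        simp only [Int.max_def]; split_ifs <;> omega
  | p :: rest, i, j, v, hv => by
      have hC := first_different_getD_nonneg p.1 p.2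
      have hCl := pvCAt_nonneg rest (i + 1) j
      have hCl' := pvCAt_nonneg rest (i + 1) (j - 1)
      simp only [pvApply]
      by_cases hji : j = i
      · rw [if_pos (Or.inl hji)]
        rw [pvApply_eval rest (i+1) j _ (by omega)]
        rw [pvCAt_cons, pvCAt_cons, if_pos hji]
        subst hji
        have h1 : pvCAt rest (j + 1) j = 0 := by unfold pvCAt; rw [if_neg (by omega)]
        rw [h1]
        by_cases hj1 : 1 ≤ j
        · have h2 : ¬ (j - 1 = j) := by omega
          rw [if_pos hj1, if_pos hj1, if_neg h2]
          have h3 : pvCAt rest (j + 1) (j - 1) = 0 := by unfold pvCAt; rw [if_neg (by omega)]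
          rw [h3]
          simp only [Int.max_def]; split_ifs <;> omega
        · rw [if_neg hj1, if_neg hj1]
          simp only [Int.max_def]; split_ifs <;> omega
      · by_cases hji1 : j = i + 1
        · rw [if_pos (Or.inr hji1)]
          rw [pvApply_eval rest (i+1) j _ (by omega)]
          rw [pvCAt_cons, pvCAt_cons]
          subst hji1
          simp only [Nat.add_sub_cancel]
          rw [if_pos (show (1:Nat) ≤ i + 1 by omega), if_pos (trivial : True),
            if_neg (show ¬ (i + 1 = i) by omega)]
          have h2 : pvCAt rest (i + 1) i = 0 := by unfold pvCAt; rw [if_neg (by omega)]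
          rw [h2]
          simp only [Int.max_def]; split_ifs <;> omega
        · rw [if_neg (by tauto)]
          rw [pvApply_eval rest (i+1) j v hv]
          rw [pvCAt_cons, pvCAt_cons, if_neg hji]
          by_cases hj1 : 1 ≤ j
          · rw [if_pos hj1, if_pos hj1, if_neg (show ¬ (j - 1 = i) by omega)]
          · rw [if_neg hj1, if_neg hj1]

theorem pvPairsLoop_length : ∀ (ps : List (String × String)) (i : Nat) (d : List Int),
    (pvPairsLoop ps i d).length = d.length
  | [], _, _ => rfl
  | p :: rest, i, d => by
      simp only [pvPairsLoop]
      rw [pvPairsLoop_length rest (i + 1) _]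
      simp

theorem pvPairsLoop_getD : ∀ (ps : List (String × String)) (i : Nat) (d : List Int) (j : Nat),
    i + ps.length + 1 ≤ d.length →
    (pvPairsLoop ps i d).getD j 0 = pvApply ps i j (d.getD j 0)
  | [], _, _, _, _ => by simp [pvPairsLoop, pvApply]
  | (s1, s2) :: rest, i, d, j, h => by
      simp only [pvPairsLoop, pvApply]
      have hlen : i + 1 < d.length := by simp only [List.length_cons] at h; omega
      have hi : i < d.length := by omega
      have hgetD : ∀ (l : List Int) (a : Nat) (v : Int) (b : Nat),
          (l.set a v).getD b 0 = if a = b ∧ a < l.length then v else l.getD b 0 := by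
        intro l a v b
        rw [List.getD_eq_getElem?_getD, List.getD_eq_getElem?_getD, List.getElem?_set]
        by_cases h1 : a = b
        · subst h1
          by_cases h2 : a < l.length
          · rw [if_pos rfl, if_pos h2, if_pos ⟨rfl, h2⟩]; rfl
          · rw [if_pos rfl, if_neg h2, if_neg (by tauto), List.getElem?_eq_none (by omega)]
        · rw [if_neg h1, if_neg (by tauto)]
      set c := (first_different s1 s2).getD 0 with hc
      set d1 := d.set i (max (d.getD i 0) c) with hd1
      set d2 := d1.set (i + 1) (max (d1.getD (i + 1) 0) c) with hd2
      have hlen1 : d1.length = d.length := by rw [hd1]; simp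
      have hlen2 : d2.length = d.length := by rw [hd2]; simp [hlen1]
      rw [pvPairsLoop_getD rest (i + 1) d2 j
        (by rw [hlen2]; simp only [List.length_cons] at h; omega)]
      congr 1
      have hd1_at : d1.getD (i+1) 0 = d.getD (i+1) 0 := by
        rw [hd1, hgetD]; rw [if_neg (by omega)]
      by_cases hji : j = i
      · rw [if_pos (Or.inl hji)]
        rw [hd2, hgetD, if_neg (by omega), hd1, hgetD, if_pos ⟨hji.symm, hi⟩, hji]
      · by_cases hji1 : j = i + 1
        · rw [if_pos (Or.inr hji1)]
          rw [hd2, hgetD, hd1_at]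
          rw [if_pos ⟨hji1.symm, by rw [hlen1]; omega⟩, hji1]
        · rw [if_neg (by tauto)]
          rw [hd2, hgetD, if_neg (by omega), hd1, hgetD, if_neg (by omega)]

-- upper bound for the running-max fold in pvMaxOther
theorem pvFoldMax_le {α : Type} (L : List α) (f : α → Int) (M : Int) :
    ∀ acc : Int, acc ≤ M → (∀ x ∈ L, f x ≤ M) →
    L.foldl (fun acc y => max acc (f y)) acc ≤ M := by
  induction L with
  | nil => intro acc h _; simpa using h
  | cons x xs ih =>
      intro acc h hall
      simp only [List.foldl_cons]
      exact ih _ (by have := hall x (by simp); omega) (fun y hy => hall y (by simp [hy]))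

-- String order bridges
theorem pvStrLt_toList {s t : String} (h : s < t) : List.Lex (· < ·) s.toList t.toList := by
  rw [String.lt_iff_toList_lt] at h
  exact List.lex_lt.mpr h

theorem pvStrLt_ne_toList {s t : String} (h : s < t) : s.toList ≠ t.toList := by
  intro hc
  exact absurd (String.ext (by simpa using hc)) (ne_of_lt h)

theorem pvStr_nonempty_toList {s : String} (h : s ≠ "") : s.toList ≠ [] := by
  intro hc
  exact h (String.ext (by simpa using hc))

-- the key fact: for a strictly sorted list of strings, the diffs cell at j computed by
-- A's adjacent-pair loop equals B's max of lcp against all other strings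
set_option maxHeartbeats 1000000 in
theorem pvKey (ss : List String) (hpw : ss.Pairwise (· < ·))
    (hne : 2 ≤ ss.length → ∀ s ∈ ss, s.toList ≠ []) (j : Nat) (hj : j < ss.length) :
    (pvPairsLoop (ss.zip ss.tail) 0 (List.replicate ss.length 0)).getD j 0
      = pvMaxOther ss (j : Int) ss[j] := by
  have hzlen : (ss.zip ss.tail).length = ss.length - 1 := by
    rw [List.length_zip, List.length_tail]; omega
  have hpwE : ∀ (a b : Nat) (ha : a < ss.length) (hb : b < ss.length), a < b →
      ss[a] < ss[b] := by
    intro a b ha hb hab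
    exact List.pairwise_iff_getElem.mp hpw a b ha hb hab
  have hCat : ∀ (m : Nat) (hm : m + 1 < ss.length),
      pvCAt (ss.zip ss.tail) 0 m
        = pvLcp (ss[m]'(by omega)).toList (ss[m+1]'hm).toList := by
    intro m hm
    unfold pvCAt
    rw [if_pos ⟨Nat.zero_le _, by omega⟩]
    have hmz : m - 0 < (ss.zip ss.tail).length := by omega
    rw [List.getD_eq_getElem _ _ hmz]
    have hzg : (ss.zip ss.tail)[m - 0]'hmz
        = ((ss[m]'(by omega)), (ss[m+1]'hm)) := by
      simp only [Nat.sub_zero, List.getElem_zip]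
      congr 1
      rw [List.getElem_tail]
    rw [hzg]
    have hlt : (ss[m]'(by omega)) < ss[m+1]'hm := hpwE m (m+1) (by omega) hm (by omega)
    rw [first_different_eq _ _ (pvStrLt_ne_toList hlt)
      (hne (by omega) _ (List.getElem_mem _))
      (hne (by omega) _ (List.getElem_mem _))]
    rfl
  have hCat0 : ∀ (m : Nat), ¬ (m + 1 < ss.length) → pvCAt (ss.zip ss.tail) 0 m = 0 := by
    intro m hm
    unfold pvCAt
    rw [if_neg (by omega)]
  rw [pvPairsLoop_getD _ 0 _ j (by rw [hzlen, List.length_replicate]; omega)]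
  have hrep : (List.replicate ss.length (0:Int)).getD j 0 = 0 := by
    rw [List.getD_eq_getElem _ _ (by rw [List.length_replicate]; exact hj)]
    simp
  rw [hrep, pvApply_eval _ 0 j 0 le_rfl]
  -- evaluate B's fold
  unfold pvMaxOther
  rw [PySem.List.foldl_ite_eq_foldl_filter]
  set L := (PySem.List.enumerate ss).filter (fun p => decide (p.1 ≠ (j : Int))) with hL
  set f : Int × String → Int := fun p => pvLcp ss[j].toList p.2.toList with hf
  have hfold := PySem.List.le_foldl_max_int L f 0
  set F := L.foldl (fun acc y => max acc (f y)) 0 with hF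
  -- membership of the neighbours in L
  have hmemL : ∀ (k : Nat) (hk : k < ss.length), k ≠ j → ((k : Int), ss[k]) ∈ L := by
    intro k hk hkj
    rw [hL, List.mem_filter]
    constructor
    · rw [PySem.List.mem_enumerate_iff]
      exact ⟨k, hk, by simp⟩
    · simp only [decide_eq_true_eq]
      intro hc
      exact hkj (by exact_mod_cast hc)
  have hCL := pvCAt_nonneg (ss.zip ss.tail) 0 (j - 1)
  have hCR := pvCAt_nonneg (ss.zip ss.tail) 0 j
  apply le_antisymm
  · -- max expression ≤ F
    have h0F : (0:Int) ≤ F := hfold.1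
    have hcl : (if 1 ≤ j then pvCAt (ss.zip ss.tail) 0 (j - 1) else 0) ≤ F := by
      by_cases hj1 : 1 ≤ j
      · rw [if_pos hj1]
        have hm : (j - 1) + 1 < ss.length := by omega
        have he : j - 1 + 1 = j := by omega
        rw [hCat (j - 1) hm]
        simp only [he]
        rw [pvLcp_comm]
        exact hfold.2 _ (hmemL (j - 1) (by omega) (by omega))
      · rw [if_neg hj1]; exact h0F
    have hcr : pvCAt (ss.zip ss.tail) 0 j ≤ F := by
      by_cases hjn : j + 1 < ss.length
      · rw [hCat j hjn]
        exact hfold.2 _ (hmemL (j + 1) hjn (by omega))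
      · rw [hCat0 j hjn]; exact h0F
    exact max_le (max_le h0F hcl) hcr
  · -- F ≤ max expression
    set M := max (max 0 (if 1 ≤ j then pvCAt (ss.zip ss.tail) 0 (j - 1) else 0))
      (pvCAt (ss.zip ss.tail) 0 j) with hM
    have h0M : (0:Int) ≤ M := le_max_of_le_left (le_max_left _ _)
    apply pvFoldMax_le L f M 0 h0M
    intro x hx
    rw [hL, List.mem_filter] at hx
    obtain ⟨hxe, hxne⟩ := hx
    rw [PySem.List.mem_enumerate_iff] at hxe
    obtain ⟨k, hk, rfl⟩ := hxe
    simp only [decide_eq_true_eq] at hxne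
    have hkj : k ≠ j := by
      intro hc; exact hxne (by simp [hc])
    rw [hf, hM]
    simp only
    rcases Nat.lt_or_ge k j with hlt | hge
    · -- k < j : bound by the left neighbour
      have hj1 : 1 ≤ j := by omega
      have hm : (j - 1) + 1 < ss.length := by omega
      have he : j - 1 + 1 = j := by omega
      have hbound : pvLcp ss[j].toList (ss[k]'(by omega)).toList
          ≤ pvCAt (ss.zip ss.tail) 0 (j - 1) := by
        rw [hCat (j - 1) hm]
        simp only [he]
        rw [pvLcp_comm]
        rcases Nat.lt_or_ge k (j - 1) with hk1 | hk1
        · have h1 : (ss[k]'(by omega)) < ss[j-1]'(by omega) :=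
            hpwE k (j-1) (by omega) (by omega) hk1
          have h2 : (ss[j-1]'(by omega)) < ss[j] := hpwE (j-1) j (by omega) hj (by omega)
          exact pvLcp_le_right (pvStrLt_toList h1) (pvStrLt_toList h2)
        · have hkeq : k = j - 1 := by omega
          subst hkeq
          exact le_rfl
      refine le_trans hbound ?_
      rw [if_pos hj1]
      exact le_max_of_le_left (le_max_right _ _)
    · -- j < k : bound by the right neighbour
      have hjn : j + 1 < ss.length := by omega
      have hbound : pvLcp ss[j].toList (ss[k]'(by omega)).toList
          ≤ pvCAt (ss.zip ss.tail) 0 j := by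
        rw [hCat j hjn]
        rcases Nat.lt_or_ge (j + 1) k with hk1 | hk1
        · have h1 : ss[j] < ss[j+1]'hjn := hpwE j (j+1) hj hjn (by omega)
          have h2 : (ss[j+1]'hjn) < ss[k]'(by omega) := hpwE (j+1) k hjn hk hk1
          exact pvLcp_le_left (pvStrLt_toList h1) (pvStrLt_toList h2)
        · have hkeq : k = j + 1 := by omega
          subst hkeq
          exact le_rfl
      exact le_trans hbound (le_max_right _ _)

-- ===== VERDICT (by name: the statement is the Claim_ definition above) =====
set_option maxHeartbeats 1000000 in
theorem unique_prefixes_py_spec : Claim_equal_unique_prefixes_py := by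
  unfold Claim_equal_unique_prefixes_py
  intro strings _ hpre
  unfold Spec_unique_prefixes_py
  simp only [unique_prefixes_py, unique_prefixes_py_alt]
  have hperm : (PySem.List.sorted strings (fun s => s) false).Perm strings :=
    PySem.List.sorted_perm strings (fun s => s) false
  set ss := PySem.List.sorted strings (fun s => s) false with hss
  have hnd : ss.Nodup := hperm.nodup_iff.mpr hpre.1
  have hle : ss.Pairwise (fun a b => a ≤ b) := PySem.List.sorted_pairwise strings (fun s => s)
  have hpw : ss.Pairwise (· < ·) :=
    (hle.and hnd).imp (fun h => lt_of_le_of_ne h.1 h.2)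
  have hne : 2 ≤ ss.length → ∀ s ∈ ss, s.toList ≠ [] := by
    intro h2 s hs
    apply pvStr_nonempty_toList
    intro hc; subst hc
    have hmem : "" ∈ strings := hperm.subset hs
    have hl1 := hpre.2 hmem
    have hlen : ss.length = strings.length := hperm.length_eq
    omega
  have hguard : ¬ ((PySem.Set.ofList ss).length ≠ ss.length) := by
    rw [PySem.Set.ofList_eq_self_of_nodup ss hnd]
    simp
  rw [if_neg hguard, PySem.List.slice_from_one]
  have hdlen : (pvPairsLoop (ss.zip ss.tail) 0 (List.replicate ss.length 0)).length
      = ss.length := by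
    rw [pvPairsLoop_length, List.length_replicate]
  apply List.ext_getElem
  · simp [List.length_zip, hdlen, PySem.List.length_enumerate]
  · intro j h1 h2
    have hj : j < ss.length := by
      simp only [List.length_map, List.length_zip, hdlen, Nat.min_self] at h1
      exact h1
    simp only [List.getElem_map, List.getElem_zip, PySem.List.getElem_enumerate]
    have hdg : (pvPairsLoop (ss.zip ss.tail) 0 (List.replicate ss.length 0))[j]'(by
        rw [hdlen]; exact hj) = pvMaxOther ss ((0:Int) + (j:Int)) ss[j] := by
      rw [← List.getD_eq_getElem _ 0 (by rw [hdlen]; exact hj)]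
      rw [pvKey ss hpw hne j hj]
      norm_num
    simp only [hdg]
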